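-- pv_equiv track=rewrite | github.com/ItayTurniansky/Python-Projects | Matrix Actions/ex3_5.py | min_max_columns
-- ===== SOURCE A (Python) =====
-- def min_max_columns(matrix):
--     """a function that return a vector with the min and max values for each column of a matrix"""
--     final_list = []
--     min_list = []
--     max_list = []
--     tmp_min = 0
--     tmp_max = 0
--     for a in range(len(matrix[0])):
--         tmp_min = matrix[0][a]
--         tmp_max = matrix[0][a]
--         for b in range(len(matrix)):
--             if matrix[b][a]>= tmp_max:
--                 tmp_max = matrix[b][a]
--             elif matrix[b][a]<= tmp_min:
--                 tmp_min = matrix[b][a]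
--         min_list.append(tmp_min)
--         max_list.append(tmp_max)
--     final_list.append(min_list)
--     final_list.append(max_list)
--     return final_list
-- ===== SOURCE B (Python) =====
-- def min_max_columns(matrix):
--     """a function that return a vector with the min and max values for each column of a matrix"""
--     ncols = len(matrix[0])
--     cols = [[row[a] for row in matrix] for a in range(ncols)]
--     return [[min(c) for c in cols], [max(c) for c in cols]]
-- ===== Notes on version B (the rewrite author's own statement) =====
-- stated objective: simpler
-- what changed: Replaces A's interleaved running-min/max comparison loop over indices with building per-column lists (a transpose) and reducing each with the built-in min and max.
import Mathlib
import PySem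

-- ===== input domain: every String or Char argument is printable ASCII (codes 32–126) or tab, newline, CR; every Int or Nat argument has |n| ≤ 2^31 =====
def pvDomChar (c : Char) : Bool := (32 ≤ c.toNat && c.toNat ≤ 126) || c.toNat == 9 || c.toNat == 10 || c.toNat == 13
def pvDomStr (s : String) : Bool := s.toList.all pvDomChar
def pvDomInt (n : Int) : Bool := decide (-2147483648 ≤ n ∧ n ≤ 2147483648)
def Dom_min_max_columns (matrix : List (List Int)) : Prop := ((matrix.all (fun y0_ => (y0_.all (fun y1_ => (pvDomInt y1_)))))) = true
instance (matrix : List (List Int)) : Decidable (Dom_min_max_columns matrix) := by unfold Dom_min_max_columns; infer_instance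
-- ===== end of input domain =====

-- B replaces A's interleaved running-min/max index loop by a build-then-reduce decomposition
-- (transpose into column lists, then builtin min/max per column); objective: simpler.

-- ===== PORT A =====
def min_max_columns (matrix : List (List Int)) : List (List Int) :=
  -- for a in range(len(matrix[0])): running tmp_min/tmp_max over b in range(len(matrix))
  let lists := (PySem.List.pyRange 0 ((PySem.List.pyGetD matrix 0 []).length : Int) 1).foldl
    (fun (acc : List Int × List Int) a =>
      let t0 := PySem.List.pyGetD (PySem.List.pyGetD matrix 0 []) a 0
      let r := (PySem.List.pyRange 0 (matrix.length : Int) 1).foldl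
        (fun (st : Int × Int) b =>
          let v := PySem.List.pyGetD (PySem.List.pyGetD matrix b []) a 0
          if v ≥ st.2 then (st.1, v)
          else if v ≤ st.1 then (v, st.2)
          else st) (t0, t0)
      (acc.1 ++ [r.1], acc.2 ++ [r.2])) ([], [])
  [lists.1, lists.2]

-- ===== PORT B =====
def min_max_columns_alt (matrix : List (List Int)) : List (List Int) :=
  let ncols := (PySem.List.pyGetD matrix 0 []).length
  let cols := (PySem.List.pyRange 0 (ncols : Int) 1).map
    (fun a => matrix.map (fun row => PySem.List.pyGetD row a 0))
  [cols.map (fun c => (PySem.List.min? c (fun x => x)).getD 0),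
   cols.map (fun c => (PySem.List.max? c (fun x => x)).getD 0)]

-- ===== PRECONDITION & SPEC =====
-- Pre_ excludes exactly the inputs where A raises IndexError: the empty matrix
-- (matrix[0]) and ragged matrices with some row shorter than the first row (matrix[b][a]).
def Pre_min_max_columns (matrix : List (List Int)) : Prop :=
  matrix ≠ [] ∧ ∀ row ∈ matrix, (matrix.headD []).length ≤ row.length
instance (matrix : List (List Int)) : Decidable (Pre_min_max_columns matrix) := by
  unfold Pre_min_max_columns; infer_instance

def pvWitness_min_max_columns : List (List Int) := [[1, 5, -2], [3, 0, 7]]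

def Spec_min_max_columns (matrix : List (List Int)) (out : List (List Int)) : Prop := out = min_max_columns_alt matrix
instance (matrix : List (List Int)) (out : List (List Int)) : Decidable (Spec_min_max_columns matrix out) := by unfold Spec_min_max_columns; infer_instance

-- ===== CLAIM (what is proved, stated in full; the proofs are below) =====
def Claim_equal_min_max_columns : Prop := ∀ (matrix : List (List Int)), Dom_min_max_columns matrix → Pre_min_max_columns matrix → Spec_min_max_columns matrix (min_max_columns matrix)

-- ===== LEMMAS AND PROOFS =====

-- A's inner running-comparison fold computes the running min and max of the column values.
theorem pv_inner_fold (a : Int) (rows : List (List Int)) (mn mx : Int) (h : mn ≤ mx) :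
    rows.foldl
      (fun (st : Int × Int) row =>
        let v := PySem.List.pyGetD row a 0
        if v ≥ st.2 then (st.1, v)
        else if v ≤ st.1 then (v, st.2)
        else st) (mn, mx)
    = ((rows.map (fun row => PySem.List.pyGetD row a 0)).foldl min mn,
       (rows.map (fun row => PySem.List.pyGetD row a 0)).foldl max mx) := by
  induction rows generalizing mn mx with
  | nil => simp
  | cons r t ih =>
    simp only [List.foldl_cons, List.map_cons]
    set v := PySem.List.pyGetD r a 0 with hv
    by_cases h1 : v ≥ mx
    · simp only [h1, if_pos]
      rw [ih mn v (le_trans h h1)]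
      have : min mn v = mn := min_eq_left (le_trans h h1)
      have h2 : max mx v = v := max_eq_right h1
      rw [this, h2]
    · simp only [h1, if_false]
      by_cases h2 : v ≤ mn
      · simp only [h2, if_pos]
        rw [ih v mx (le_trans h2 h)]
        have : min mn v = v := min_eq_right h2
        have h3 : max mx v = mx := max_eq_left (by omega)
        rw [this, h3]
      · simp only [h2, if_false]
        rw [ih mn mx h]
        have : min mn v = mn := min_eq_left (by omega)
        have h3 : max mx v = mx := max_eq_left (by omega)
        rw [this, h3]

-- fold of the pair-building loop body is the pair of maps (specific shape of A's outer loop)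
theorem pv_pair_fold (l : List Int) (F G : Int → Int) (acc1 acc2 : List Int) :
    l.foldl (fun (acc : List Int × List Int) a => (acc.1 ++ [F a], acc.2 ++ [G a])) (acc1, acc2)
      = (acc1 ++ l.map F, acc2 ++ l.map G) := by
  induction l generalizing acc1 acc2 with
  | nil => simp
  | cons x t ih => simp only [List.foldl_cons, List.map_cons, ih]; simp

-- ===== VERDICT (by name: the statement is the Claim_ definition above) =====
theorem min_max_columns_spec : Claim_equal_min_max_columns := by
  intro matrix _ hpre
  cases matrix with
  | nil => exact absurd rfl hpre.1
  | cons r0 rest =>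
    show min_max_columns (r0 :: rest) = min_max_columns_alt (r0 :: rest)
    unfold min_max_columns min_max_columns_alt
    simp only [PySem.List.pyGetD_zero_cons]
    rw [pv_pair_fold]
    simp only [List.nil_append, List.map_map, List.cons.injEq, and_true]
    constructor
    · apply List.map_congr_left
      intro a ha
      rw [PySem.List.foldl_pyRange_zero_pyGetD' (r0 :: rest) []
          (fun (st : Int × Int) row =>
            if PySem.List.pyGetD row a 0 ≥ st.2 then (st.1, PySem.List.pyGetD row a 0)
            else if PySem.List.pyGetD row a 0 ≤ st.1 then (PySem.List.pyGetD row a 0, st.2)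
            else st)]
      simp only [List.foldl_cons, ge_iff_le, le_refl, if_pos]
      rw [pv_inner_fold a rest (PySem.List.pyGetD r0 a 0) (PySem.List.pyGetD r0 a 0) le_rfl]
      simp only [Function.comp_apply, List.map_cons, PySem.List.min?_id_cons, Option.getD_some]
    · apply List.map_congr_left
      intro a ha
      rw [PySem.List.foldl_pyRange_zero_pyGetD' (r0 :: rest) []
          (fun (st : Int × Int) row =>
            if PySem.List.pyGetD row a 0 ≥ st.2 then (st.1, PySem.List.pyGetD row a 0)
            else if PySem.List.pyGetD row a 0 ≤ st.1 then (PySem.List.pyGetD row a 0, st.2)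
            else st)]
      simp only [List.foldl_cons, ge_iff_le, le_refl, if_pos]
      rw [pv_inner_fold a rest (PySem.List.pyGetD r0 a 0) (PySem.List.pyGetD r0 a 0) le_rfl]
      simp only [Function.comp_apply, List.map_cons, PySem.List.max?_id_cons, Option.getD_some]
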